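-- pv_equiv track=rewrite | github.com/tsaibingyi/example | get_odds.py | get_odds
-- ===== SOURCE A (Python) =====
-- def get_odds(a):
-- 	result={} #{}是字典的意思,詳細用法在我給你的那本書的p2-7有
-- 	n=0
-- 	for i in range(a):
-- 		if i%2==1:
-- 			n+=1 #n在這裡表示第n個奇數
-- 			result[n]=i #將字典中“鍵”的值設為i,表示第n個奇數是i
-- 	return result
-- ===== SOURCE B (Python) =====
-- def get_odds(a):
--     # k-th odd number is 2*k-1; there are a//2 odds below a
--     return {k: 2 * k - 1 for k in range(1, a // 2 + 1)}
-- ===== Notes on version B (the rewrite author's own statement) =====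
-- stated objective: simpler
-- what changed: Replaces the scan over every number below a with its parity filter and running counter by a single dict comprehension over the ordinals, computing each odd directly by its closed form from the ordinal.
import Mathlib
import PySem

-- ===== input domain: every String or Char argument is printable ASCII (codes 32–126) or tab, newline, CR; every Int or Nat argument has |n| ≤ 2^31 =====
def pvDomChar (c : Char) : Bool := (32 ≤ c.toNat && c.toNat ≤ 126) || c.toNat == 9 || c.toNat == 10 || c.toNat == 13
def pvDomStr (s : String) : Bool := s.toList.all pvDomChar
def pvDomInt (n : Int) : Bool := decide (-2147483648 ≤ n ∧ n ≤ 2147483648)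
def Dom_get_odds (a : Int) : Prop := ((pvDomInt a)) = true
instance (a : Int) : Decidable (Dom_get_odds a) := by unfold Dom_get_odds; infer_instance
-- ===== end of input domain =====

-- B replaces A's full scan with parity filter and running counter by a dict
-- comprehension over the ordinals, each odd computed by its closed form (simpler).

-- ===== PORT A =====
-- A: for i in range(a): if i % 2 == 1: n += 1; result[n] = i
def get_odds (a : Int) : List (Int × Int) :=
  ((PySem.List.pyRange 0 a 1).foldl
    (fun (st : Int × PySem.Dict Int Int) i =>
      if PySem.Int.mod i 2 == 1 then (st.1 + 1, st.2.insert (st.1 + 1) i) else st)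
    (0, PySem.Dict.empty)).2.items

-- ===== PORT B =====
-- B: {k: 2*k - 1 for k in range(1, a//2 + 1)}
def get_odds_alt (a : Int) : List (Int × Int) :=
  ((PySem.List.pyRange 1 (PySem.Int.floordiv a 2 + 1) 1).foldl
    (fun (d : PySem.Dict Int Int) k => d.insert k (2 * k - 1))
    PySem.Dict.empty).items

-- ===== PRECONDITION & SPEC =====
def Spec_get_odds (a : Int) (out : List (Int × Int)) : Prop := out = get_odds_alt a
instance (a : Int) (out : List (Int × Int)) : Decidable (Spec_get_odds a out) := by unfold Spec_get_odds; infer_instance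

-- ===== CLAIM (what is proved, stated in full; the proofs are below) =====
def Claim_equal_get_odds : Prop := ∀ (a : Int), Dom_get_odds a → Spec_get_odds a (get_odds a)

-- ===== LEMMAS AND PROOFS =====

-- The state of A's loop after scanning range(0, m): counter = m/2, dict items = [(k, 2k-1) for k in 1..m/2]
theorem getOdds_loopA (m : Nat) :
    ((PySem.List.pyRange 0 (m : Int) 1).foldl
      (fun (st : Int × PySem.Dict Int Int) i =>
        if PySem.Int.mod i 2 == 1 then (st.1 + 1, st.2.insert (st.1 + 1) i) else st)
      (0, PySem.Dict.empty))
    = (((m / 2 : Nat) : Int),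
       PySem.Dict.mk ((PySem.List.pyRange 1 (((m / 2 : Nat) : Int) + 1) 1).map
         (fun k => (k, 2 * k - 1)))) := by
  induction m with
  | zero => decide
  | succ m ih =>
    have hmodc : PySem.Int.mod (m : Int) 2 = ((m % 2 : Nat) : Int) := by
      exact_mod_cast PySem.Int.mod_natCast m 2
    rw [show ((m + 1 : Nat) : Int) = (m : Int) + 1 by push_cast; ring,
        PySem.List.pyRange_one_succ_right (by positivity), List.foldl_append, ih]
    simp only [List.foldl_cons, List.foldl_nil]
    rcases Nat.even_or_odd m with ⟨j, hj⟩ | ⟨j, hj⟩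
    · have hmod : PySem.Int.mod (m : Int) 2 = 0 := by rw [hmodc]; omega
      have h2 : (m + 1) / 2 = m / 2 := by omega
      rw [if_neg (by rw [hmod]; decide), h2]
    · have hmod : PySem.Int.mod (m : Int) 2 = 1 := by rw [hmodc]; omega
      have h2 : (m + 1) / 2 = m / 2 + 1 := by omega
      have hfresh : (PySem.Dict.mk ((PySem.List.pyRange 1 (((m / 2 : Nat) : Int) + 1) 1).map
          (fun k => (k, 2 * k - 1)))).contains (((m / 2 : Nat) : Int) + 1) = false := by
        simp only [PySem.Dict.contains_mk, List.any_map, List.any_eq_false, Function.comp]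
        intro k hk
        rw [PySem.List.mem_pyRange_one] at hk
        simpa using (by omega : ¬ k = ((m / 2 : Nat) : Int) + 1)
      rw [if_pos (by rw [hmod]; decide)]
      refine Prod.ext ?_ ?_
      · show ((m / 2 : Nat) : Int) + 1 = (((m + 1) / 2 : Nat) : Int)
        omega
      · show _ = PySem.Dict.mk _
        apply PySem.Dict.ext
        rw [PySem.Dict.items_insert_of_not_contains _ _ hfresh]
        rw [show (((m + 1) / 2 : Nat) : Int) + 1 = (((m / 2 : Nat) : Int) + 1) + 1 by omega,
            PySem.List.pyRange_one_succ_right (a := 1) (b := ((m / 2 : Nat) : Int) + 1) (by omega), List.map_append]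
        simp only [List.map_cons, List.map_nil]
        congr 2
        exact Prod.ext rfl (by omega)

-- B's loop over fresh distinct keys appends: items = the map
theorem getOdds_alt_eq (a : Int) :
    get_odds_alt a
    = (PySem.List.pyRange 1 (PySem.Int.floordiv a 2 + 1) 1).map (fun k => (k, 2 * k - 1)) := by
  unfold get_odds_alt
  have h := PySem.Dict.items_foldl_insert_fresh
      (PySem.List.pyRange 1 (PySem.Int.floordiv a 2 + 1) 1) (fun x => x)
      (fun k => 2 * k - 1) PySem.Dict.empty
      (fun x _ => PySem.Dict.contains_empty x)
      (by simpa using PySem.List.nodup_pyRange_one 1 (PySem.Int.floordiv a 2 + 1))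
  simpa using h

-- ===== VERDICT (by name: the statement is the Claim_ definition above) =====
theorem get_odds_spec : Claim_equal_get_odds := by
  intro a _
  show get_odds a = get_odds_alt a
  rw [getOdds_alt_eq]
  rcases (by omega : a ≤ 0 ∨ 0 < a) with ha | ha
  · unfold get_odds
    rw [PySem.List.pyRange_one_eq_nil ha, PySem.List.pyRange_one_eq_nil]
    · rfl
    · have := PySem.Int.floordiv_mul_add_mod a 2
      have h0 := PySem.Int.mod_nonneg a (b := 2) (by omega)
      have h1 := PySem.Int.mod_lt a (b := 2) (by omega)
      omega
  · obtain ⟨m, rfl⟩ : ∃ m : Nat, a = (m : Int) := ⟨a.toNat, by omega⟩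
    unfold get_odds
    rw [getOdds_loopA]
    have hf : PySem.Int.floordiv (m : Int) 2 = ((m / 2 : Nat) : Int) := by
      exact_mod_cast PySem.Int.floordiv_natCast m 2
    rw [hf]
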